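-- pv_equiv track=rewrite | github.com/auroramugnai/Minimum-Exact-Cover-Problem | MECP_with-QAOA/utils_to_study_an_instance.py | edges_from_sets
-- ===== SOURCE A (Python) =====
-- def edges_from_sets(subsets):
--     """
--     Creates a list of edges for a graph, where each edge connects two sets that have a non-zero intersection.
--
--     Parameters
--     ----------
--     subsets (list of sets): A list of sets.
--
--     Returns
--     -------
--     egs (list of tuples): A list of tuples representing the edges of a graph.
--     Each tuple (i, j) indicates that subsets i and j have a non-zero intersection.
--
--     Example
--     -------
--     (1, 3) means that the 1st and 3rd subsets have a non-zero intersection.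
--
--     """
--     egs = []
--     l = len(subsets)
--
--     # Loop through all pairs of subsets
--     for i in range(l):
--         for j in range(i, l):
--             # Find the intersection between subsets i and j
--             w = subsets[i].intersection(subsets[j])
--
--             # If intersection is non-zero and subsets are different, add edge
--             if len(w) != 0 and i != j:
--                 egs.append((i, j))
--
--     return egs
-- ===== SOURCE B (Python) =====
-- def edges_from_sets(subsets):
--     # Inverted index: element -> list of indices of the subsets containing it.
--     occ = {}
--     for i in range(len(subsets)):
--         for x in subsets[i]:
--             occ.setdefault(x, []).append(i)
--     egs = []
--     for i in range(len(subsets)):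
--         js = set()
--         for x in subsets[i]:
--             js.update(occ[x])
--         egs.extend((i, j) for j in sorted(js) if j > i)
--     return egs
-- ===== Notes on version B (the rewrite author's own statement) =====
-- stated objective: faster
-- what changed: Replaces A's all-pairs set-intersection scan with an inverted index element->subset indices; each subset's partners are the union of its elements' occurrence lists, emitted sorted per row.
import Mathlib
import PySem

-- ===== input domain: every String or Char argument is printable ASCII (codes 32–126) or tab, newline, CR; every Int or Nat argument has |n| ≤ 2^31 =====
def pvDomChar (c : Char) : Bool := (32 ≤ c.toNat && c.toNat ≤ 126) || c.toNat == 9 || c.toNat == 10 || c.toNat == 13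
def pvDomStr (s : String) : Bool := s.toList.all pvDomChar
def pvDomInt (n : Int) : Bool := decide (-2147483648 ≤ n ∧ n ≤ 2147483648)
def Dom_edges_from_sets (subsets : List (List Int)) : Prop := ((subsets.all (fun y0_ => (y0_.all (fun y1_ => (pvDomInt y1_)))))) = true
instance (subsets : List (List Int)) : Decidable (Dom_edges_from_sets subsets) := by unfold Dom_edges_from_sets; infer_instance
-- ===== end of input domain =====

-- B replaces A's quadratic all-pairs intersection scan by an inverted index (element -> subset indices),
-- unioning occurrence lists per subset and emitting the sorted partners; alternative algorithm, same output.


-- ===== PORT A =====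
-- w = subsets[i].intersection(subsets[j]) : sets are lists of distinct elements; Set.inter is Python's set intersection
def edges_from_sets (subsets : List (List Int)) : List (Int × Int) :=
  (PySem.List.pyRange 0 (subsets.length : Int) 1).foldl (fun egs i =>
    (PySem.List.pyRange i (subsets.length : Int) 1).foldl (fun egs j =>
      let w := PySem.Set.inter (PySem.Set.ofList (PySem.List.pyGetD subsets i []))
                               (PySem.List.pyGetD subsets j [])
      if w.length ≠ 0 ∧ i ≠ j then egs ++ [(i, j)] else egs) egs) []

-- ===== PORT B =====
-- occ.setdefault(x, []).append(i)  =  modify x [] (· ++ [i]);  occ[x] always hits (x ∈ subsets[i]), ported as getD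
def pvOcc (subsets : List (List Int)) : PySem.Dict Int (List Int) :=
  (PySem.List.pyRange 0 (subsets.length : Int) 1).foldl (fun d i =>
    (PySem.List.pyGetD subsets i []).foldl (fun d x => d.modify x [] (· ++ [i])) d) PySem.Dict.empty

def edges_from_sets_alt (subsets : List (List Int)) : List (Int × Int) :=
  let occ := pvOcc subsets
  (PySem.List.pyRange 0 (subsets.length : Int) 1).foldl (fun egs i =>
    let js : PySem.Set Int := (PySem.List.pyGetD subsets i []).foldl
      (fun js x => PySem.Set.update js (occ.getD x [])) PySem.Set.empty
    egs ++ ((PySem.List.sorted js (fun j => j) false).filter (fun j => decide (i < j))).map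
      (fun j => (i, j))) []

-- ===== PRECONDITION & SPEC =====
def Spec_edges_from_sets (subsets : List (List Int)) (out : List (Int × Int)) : Prop := out = edges_from_sets_alt subsets
instance (subsets : List (List Int)) (out : List (Int × Int)) : Decidable (Spec_edges_from_sets subsets out) := by unfold Spec_edges_from_sets; infer_instance

-- ===== CLAIM (what is proved, stated in full; the proofs are below) =====
def Claim_equal_edges_from_sets : Prop := ∀ (subsets : List (List Int)), Dom_edges_from_sets subsets → Spec_edges_from_sets subsets (edges_from_sets subsets)

-- ===== LEMMAS AND PROOFS =====

-- nested occurrence loop as one fold over (element, index) pairs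
theorem pv_foldl_nested {δ : Type} (l : List Int) (g : Int → List Int) (F : δ → Int × Int → δ) (d : δ) :
    l.foldl (fun d i => (g i).foldl (fun d x => F d (x, i)) d) d
      = (l.flatMap (fun i => (g i).map (fun x => (x, i)))).foldl F d := by
  induction l generalizing d with
  | nil => rfl
  | cons a t ih => simp [List.foldl_append, List.foldl_map, ih]

theorem pv_mem_foldl_update (l : List Int) (F : Int → List Int) (s : PySem.Set Int) (j : Int) :
    (j ∈ l.foldl (fun js x => PySem.Set.update js (F x)) s) ↔ (j ∈ s ∨ ∃ x ∈ l, j ∈ F x) := by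
  induction l generalizing s with
  | nil => simp
  | cons a t ih => simp [ih, PySem.Set.mem_update, or_assoc]

theorem pv_nodup_foldl_update (l : List Int) (F : Int → List Int) (s : PySem.Set Int) (hs : s.Nodup) :
    (l.foldl (fun js x => PySem.Set.update js (F x)) s).Nodup := by
  induction l generalizing s with
  | nil => exact hs
  | cons a t ih => exact ih (PySem.Set.update s (F a)) (PySem.Set.nodup_update s (F a) hs)
theorem pv_occ_flat (subsets : List (List Int)) :
    pvOcc subsets
      = ((PySem.List.pyRange 0 (subsets.length : Int) 1).flatMap
          (fun i => (PySem.List.pyGetD subsets i []).map (fun x => (x, i)))).foldl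
          (fun d p => PySem.Dict.modify d p.1 [] (· ++ [p.2])) PySem.Dict.empty := by
  unfold pvOcc
  exact pv_foldl_nested (PySem.List.pyRange 0 (subsets.length : Int) 1)
    (fun i => PySem.List.pyGetD subsets i [])
    (fun d p => PySem.Dict.modify d p.1 [] (· ++ [p.2])) PySem.Dict.empty

theorem pv_mem_occ (subsets : List (List Int)) (x j : Int) :
    j ∈ (pvOcc subsets).getD x [] ↔ 0 ≤ j ∧ j < (subsets.length : Int) ∧ x ∈ PySem.List.pyGetD subsets j [] := by
  rw [pv_occ_flat, PySem.Dict.getD_foldl_modify_append]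
  simp only [PySem.Dict.getD_empty, List.nil_append, List.mem_map, List.mem_filter,
    List.mem_flatMap, PySem.List.mem_pyRange_one]
  constructor
  · rintro ⟨⟨x', i⟩, ⟨⟨i', hi, x'', hx, hq'⟩, hq⟩, rfl⟩
    simp only [Prod.mk.injEq] at hq'
    obtain ⟨rfl, rfl⟩ := hq'
    simp only [beq_iff_eq] at hq
    subst hq
    exact ⟨hi.1, hi.2, hx⟩
  · rintro ⟨h0, hn, hx⟩
    exact ⟨(x, j), ⟨⟨j, ⟨h0, hn⟩, ⟨x, hx, rfl⟩⟩, by simp⟩, rfl⟩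

def pvJs (subsets : List (List Int)) (i : Int) : PySem.Set Int :=
  (PySem.List.pyGetD subsets i []).foldl
    (fun js x => PySem.Set.update js ((pvOcc subsets).getD x [])) PySem.Set.empty

theorem pv_A_eq (subsets : List (List Int)) :
    edges_from_sets subsets
      = (PySem.List.pyRange 0 (subsets.length : Int) 1).flatMap (fun i =>
          ((PySem.List.pyRange i (subsets.length : Int) 1).filter (fun j =>
            decide ((PySem.Set.inter (PySem.Set.ofList (PySem.List.pyGetD subsets i []))
              (PySem.List.pyGetD subsets j [])).length ≠ 0 ∧ i ≠ j))).map (fun j => (i, j))) := by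
  simp only [edges_from_sets, PySem.List.foldl_append_ite, PySem.List.foldl_append_eq_flatMap,
    List.nil_append]

theorem pv_B_eq (subsets : List (List Int)) :
    edges_from_sets_alt subsets
      = (PySem.List.pyRange 0 (subsets.length : Int) 1).flatMap (fun i =>
          ((PySem.List.sorted (pvJs subsets i) (fun j => j) false).filter (fun j =>
            decide (i < j))).map (fun j => (i, j))) := by
  simp only [edges_from_sets_alt, pvJs, PySem.List.foldl_append_eq_flatMap, List.nil_append]

theorem pv_inter_ne (a b : List Int) :
    ((PySem.Set.inter (PySem.Set.ofList a) b).length ≠ 0) ↔ ∃ x, x ∈ a ∧ x ∈ b := by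
  rw [Ne, List.length_eq_zero_iff, ← Ne, ← List.isEmpty_eq_false_iff,
    List.isEmpty_eq_false_iff_exists_mem]
  simp [PySem.Set.mem_inter, PySem.Set.mem_ofList]

theorem pv_sorted_js_pairwise (s : PySem.Set Int) (hs : s.Nodup) :
    (PySem.List.sorted s (fun j => j) false).Pairwise (· < ·) := by
  have h1 := PySem.List.sorted_pairwise s (fun j => j)
  have h2 : (PySem.List.sorted s (fun j => j) false).Nodup :=
    ((PySem.List.sorted_perm s (fun j => j) false).nodup_iff).mpr hs
  exact (h1.and h2).imp (fun h => lt_of_le_of_ne h.1 h.2)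

theorem pv_eq_of_pairwise_lt (l1 l2 : List Int) (h1 : l1.Pairwise (· < ·))
    (h2 : l2.Pairwise (· < ·)) (h : ∀ j, j ∈ l1 ↔ j ∈ l2) : l1 = l2 := by
  have n1 : l1.Nodup := h1.imp fun h => ne_of_lt h
  have n2 : l2.Nodup := h2.imp fun h => ne_of_lt h
  have hp : l1.Perm l2 := by rw [List.perm_ext_iff_of_nodup n1 n2]; exact h
  exact hp.eq_of_pairwise (fun a b _ _ hab hba => le_antisymm hab hba)
    (h1.imp le_of_lt) (h2.imp le_of_lt)

theorem pv_row_eq (subsets : List (List Int)) (i : Int) (h0 : 0 ≤ i) :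
    (PySem.List.pyRange i (subsets.length : Int) 1).filter (fun j =>
        decide ((PySem.Set.inter (PySem.Set.ofList (PySem.List.pyGetD subsets i []))
          (PySem.List.pyGetD subsets j [])).length ≠ 0 ∧ i ≠ j))
      = (PySem.List.sorted (pvJs subsets i) (fun j => j) false).filter (fun j => decide (i < j)) := by
  apply pv_eq_of_pairwise_lt
  · exact (PySem.List.pairwise_lt_pyRange_one i _).filter _
  · exact (pv_sorted_js_pairwise _ (pv_nodup_foldl_update _ _ _ List.nodup_nil)).filter _
  · intro j
    simp only [List.mem_filter, PySem.List.mem_pyRange_one, PySem.List.mem_sorted,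
      decide_eq_true_eq, pvJs, pv_mem_foldl_update, pv_inter_ne, pv_mem_occ]
    constructor
    · rintro ⟨⟨hij, hjn⟩, ⟨x, hxi, hxj⟩, hne⟩
      exact ⟨Or.inr ⟨x, hxi, le_trans h0 hij, hjn, hxj⟩, lt_of_le_of_ne hij hne⟩
    · rintro ⟨h, hij⟩
      rcases h with h | ⟨x, hxi, _, hjn, hxj⟩
      · simp [PySem.Set.empty] at h
      · exact ⟨⟨le_of_lt hij, hjn⟩, ⟨x, hxi, hxj⟩, ne_of_lt hij⟩


-- ===== VERDICT (by name: the statement is the Claim_ definition above) =====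
theorem edges_from_sets_spec : Claim_equal_edges_from_sets := by
  intro subsets _
  unfold Spec_edges_from_sets
  rw [pv_A_eq, pv_B_eq]
  apply List.flatMap_congr
  intro i hi
  rw [pv_row_eq subsets i ((PySem.List.mem_pyRange_one.mp hi).1)]
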